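-- pv_equiv track=rewrite | github.com/tianalopez/algorithm-practice | Coding Challenges/asna0.5.py | solution
-- ===== SOURCE A (Python) =====
-- def solution(commands):
--     current_directory = "/"
--
--     for command in commands:
--         if command == "cd /":
--             current_directory = "/"
--         elif command == "cd .":
--             continue
--         elif command == "cd ..":
--             if current_directory != "/":
--                 current_directory = "/".join(current_directory.split("/")[:-1])
--                 if not current_directory:
--                     current_directory = "/"
--         else:
--             directory = command.split(" ")[1]
--             if current_directory == "/":
--                 current_directory += directory
--             else:
--                 current_directory += "/" + directory
--     return current_directory
-- ===== SOURCE B (Python) =====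
-- def solution(commands):
--     # Right-to-left scan: the last "cd /" makes everything before it irrelevant,
--     # ".." becomes a deferred-pop counter, and surviving components are collected.
--     comps = []
--     skip = 0
--     for command in reversed(commands):
--         if command == "cd /":
--             break
--         elif command == "cd .":
--             continue
--         elif command == "cd ..":
--             skip += 1
--         else:
--             parts = command.split(" ")[1].split("/")
--             while skip and parts:
--                 parts.pop()
--                 skip -= 1
--             comps = parts + comps
--     return "/" + "/".join(comps)
-- ===== Notes on version B (the rewrite author's own statement) =====
-- stated objective: alternative
-- what changed: B replaces A's forward simulation of the path string (re-split and re-joined at every command) by a single right-to-left scan that stops at the last 'cd /', turns each 'cd ..' into a deferred-pop counter, and collects the surviving components into one final join; …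
-- outside the precondition, e.g. on solution(['cd ', 'cd a']): A returns '/a', B returns '//a'; on solution(['cd /x', 'cd ..', 'cd a']): A returns '/a', B returns '//a'; on solution(['oops']): A raises IndexError, B raises IndexError
import Mathlib
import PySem

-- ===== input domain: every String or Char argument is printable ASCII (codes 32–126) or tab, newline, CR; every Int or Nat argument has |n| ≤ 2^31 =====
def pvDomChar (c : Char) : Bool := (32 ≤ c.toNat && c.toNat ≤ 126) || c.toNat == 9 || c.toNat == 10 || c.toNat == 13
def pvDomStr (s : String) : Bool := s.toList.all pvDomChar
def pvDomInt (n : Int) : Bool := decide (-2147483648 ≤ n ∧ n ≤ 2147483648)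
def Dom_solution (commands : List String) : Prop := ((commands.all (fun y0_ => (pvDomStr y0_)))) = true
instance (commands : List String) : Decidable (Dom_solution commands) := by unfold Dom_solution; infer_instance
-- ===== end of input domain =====

-- B resolves the path by a single right-to-left scan (stop at the last "cd /", count deferred
-- pops for "cd ..", collect surviving components, one final join) instead of A's forward
-- re-split/re-join of the path string at every command (objective: alternative).

-- ===== PORT A =====
-- one iteration of A's loop; cur is current_directory as a list of code points
def solStepA (cur : List Char) (cmd : List Char) : List Char :=
  if cmd = "cd /".toList then "/".toList
  else if cmd = "cd .".toList then cur
  else if cmd = "cd ..".toList then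
    if cur ≠ "/".toList then
      let nd := PySem.Chars.join "/".toList
        (PySem.List.slice (PySem.Chars.splitOn cur "/".toList) none (some (-1)))
      if nd = [] then "/".toList else nd
    else cur
  else
    -- command.split(" ")[1]: Pre_solution rules out the IndexError (none) case, so the [] default is never read inside Pre_
    let d := (PySem.List.pyGet? (PySem.Chars.splitOn cmd " ".toList) 1).getD []
    if cur = "/".toList then cur ++ d else cur ++ "/".toList ++ d

def solution (commands : List String) : String :=
  String.mk (commands.foldl (fun cur c => solStepA cur c.toList) "/".toList)

-- ===== PORT B =====
-- the inner 'while skip and parts: parts.pop(); skip -= 1'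
def popLoop : List (List Char) → Nat → List (List Char) × Nat
  | parts, 0 => (parts, 0)
  | [], skip + 1 => ([], skip + 1)
  | p :: ps, skip + 1 => popLoop (p :: ps).dropLast skip

-- the 'for command in reversed(commands)' loop with its break at "cd /"
def solRevLoop : List String → List (List Char) → Nat → List (List Char)
  | [], comps, _ => comps
  | c :: rest, comps, skip =>
    if c = "cd /" then comps
    else if c = "cd ." then solRevLoop rest comps skip
    else if c = "cd .." then solRevLoop rest comps (skip + 1)
    else
      -- command.split(" ")[1]: the same IndexError case, excluded by Pre_solution
      let d := (PySem.List.pyGet? (PySem.Chars.splitOn c.toList " ".toList) 1).getD []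
      let parts := PySem.Chars.splitOn d "/".toList
      let r := popLoop parts skip
      solRevLoop rest (r.1 ++ comps) r.2

def solution_alt (commands : List String) : String :=
  String.mk ('/' :: PySem.Chars.join "/".toList (solRevLoop commands.reverse [] 0))

-- ===== PRECONDITION & SPEC =====
-- the space-separated argument of a non-special command (empty also when there is none)
def argOf (cmd : List Char) : List Char :=
  (PySem.List.pyGet? (PySem.Chars.splitOn cmd [' ']) 1).getD []

-- the three commands A handles without reading an argument
def isSpecial (c : String) : Bool := c == "cd /" || c == "cd ." || c == "cd .."

-- a directory argument that is nonempty and does not begin with '/'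
def goodArg (c : String) : Bool :=
  decide (argOf c.toList ≠ []) && decide ((argOf c.toList).head? ≠ some '/')

-- Pre_ excludes the inputs on which Python raises IndexError (a non-special command with no
-- second space-token), and those where a command whose directory argument is empty or begins
-- with '/' is followed by another directory-changing command: how such degenerate path
-- components combine is unspecified — A sometimes keeps the '//'-prefixed path and sometimes
-- collapses it to '/', B always keeps the components literally — and neither choice is canonical.
def Pre_solution (commands : List String) : Prop :=
  (∀ c ∈ commands, isSpecial c = false → 2 ≤ (PySem.Chars.splitOn c.toList [' ']).length) ∧
  List.Pairwise (fun a b => isSpecial a = false → isSpecial b = false → goodArg a = true)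
    commands

instance (commands : List String) : Decidable (Pre_solution commands) := by
  unfold Pre_solution; infer_instance

def pvWitness_solution : List String := ["cd home", "cd x/y", "cd .."]

def Spec_solution (commands : List String) (out : String) : Prop := out = solution_alt commands
instance (commands : List String) (out : String) : Decidable (Spec_solution commands out) := by
  unfold Spec_solution; infer_instance

-- ===== CLAIM (what is proved, stated in full; the proofs are below) =====
def Claim_equal_solution : Prop := ∀ (commands : List String), Dom_solution commands →
  Pre_solution commands → Spec_solution commands (solution commands)

-- ===== LEMMAS AND PROOFS =====

-- the common forward semantics: a stack of '/'-free components, root = []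
def stackStep (st : List (List Char)) (c : String) : List (List Char) :=
  if c = "cd /" then []
  else if c = "cd ." then st
  else if c = "cd .." then st.dropLast
  else st ++ PySem.Chars.splitOn (argOf c.toList) ['/']

-- invariants of reachable stacks: components are '/'-free; up to the last push the
-- bottom component is also nonempty
def slashFree (st : List (List Char)) : Prop := ∀ p ∈ st, '/' ∉ p
def goodB (st : List (List Char)) : Prop := ∀ h, st.head? = some h → h ≠ []

theorem join_def (sep : List Char) (ps : List (List Char)) :
    PySem.Chars.join sep ps = sep.intercalate ps := rfl
theorem splitOn_def (c : Char) (s : List Char) :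
    List.splitOn c s = List.splitOnP (· == c) s := rfl
theorem splitOn_ne_nil (c : Char) (s : List Char) : List.splitOn c s ≠ [] := by
  rw [splitOn_def]; exact List.splitOnP_ne_nil _ _

-- PySem's splitOn on a one-character separator is Mathlib's List.splitOn
theorem splitOn_go_eq (c : Char) : ∀ (fuel : Nat) (l cur : List Char) (acc : List (List Char)),
    l.length < fuel →
    PySem.Chars.splitOn.go [c] fuel l cur acc
      = acc.reverse ++ (List.splitOn c l).modifyHead (cur.reverse ++ ·) := by
  intro fuel
  induction fuel with
  | zero => intro l cur acc h; exact absurd h (Nat.not_lt_zero _)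
  | succ f ih =>
    intro l cur acc h
    cases l with
    | nil =>
      simp [PySem.Chars.splitOn.go]
    | cons ch rest =>
      by_cases hc : ch = c
      · subst hc
        have hpre : List.isPrefixOf [ch] (ch :: rest) = true := by
          simp [List.isPrefixOf]
        rw [show PySem.Chars.splitOn.go [ch] (f+1) (ch :: rest) cur acc
              = PySem.Chars.splitOn.go [ch] f rest [] (cur.reverse :: acc) by
            simp [PySem.Chars.splitOn.go, hpre]]
        rw [ih rest [] (cur.reverse :: acc) (by simpa using Nat.lt_of_succ_lt_succ h)]
        conv_rhs => rw [splitOn_def, List.splitOnP_cons, ← splitOn_def]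
        obtain ⟨h0, t0, hS⟩ := List.exists_cons_of_ne_nil (splitOn_ne_nil ch rest)
        rw [hS]
        simp [List.modifyHead_cons]
      · have hpre : List.isPrefixOf [c] (ch :: rest) = false := by
          simp [List.isPrefixOf]
          exact fun hcc => absurd hcc.symm hc
        rw [show PySem.Chars.splitOn.go [c] (f+1) (ch :: rest) cur acc
              = PySem.Chars.splitOn.go [c] f rest (ch :: cur) acc by
            simp [PySem.Chars.splitOn.go, hpre]]
        rw [ih rest (ch :: cur) acc (by simpa using Nat.lt_of_succ_lt_succ h)]
        conv_rhs => rw [splitOn_def, List.splitOnP_cons, ← splitOn_def]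
        obtain ⟨h0, t0, hS⟩ := List.exists_cons_of_ne_nil (splitOn_ne_nil c rest)
        rw [hS]
        simp [List.modifyHead_cons, hc]

theorem splitOn_single (c : Char) (s : List Char) :
    PySem.Chars.splitOn s [c] = List.splitOn c s := by
  show PySem.Chars.splitOn.go [c] (s.length + 1) s [] [] = _
  rw [splitOn_go_eq c (s.length + 1) s [] [] (by omega)]
  obtain ⟨h0, t0, hS⟩ := List.exists_cons_of_ne_nil (splitOn_ne_nil c s)
  rw [hS]
  simp [List.modifyHead_cons]

-- no piece of List.splitOn c s contains c
theorem not_mem_of_mem_splitOn (c : Char) : ∀ (s : List Char), ∀ l ∈ List.splitOn c s, c ∉ l := by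
  intro s
  induction s with
  | nil =>
    intro l hl
    rw [splitOn_def, List.splitOnP_nil] at hl
    simp at hl; subst hl; simp
  | cons a s ih =>
    intro l hl
    rw [splitOn_def, List.splitOnP_cons, ← splitOn_def] at hl
    by_cases hac : a = c
    · simp [hac] at hl
      rcases hl with h | h
      · subst h; simp
      · exact ih l h
    · have : (a == c) = false := by simp [hac]
      rw [this] at hl
      simp only [Bool.false_eq_true, if_false] at hl
      obtain ⟨h0, t0, hS⟩ := List.exists_cons_of_ne_nil (splitOn_ne_nil c s)
      rw [hS, List.modifyHead_cons] at hl
      rcases List.mem_cons.mp hl with h | h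
      · subst h
        intro hmem
        rcases List.mem_cons.mp hmem with h' | h'
        · exact hac h'.symm
        · exact ih h0 (hS ▸ List.mem_cons_self) h'
      · exact ih l (hS ▸ List.mem_cons_of_mem _ h)

-- joining the pieces of a '/'-split restores the string
theorem join_splitOn (s : List Char) :
    PySem.Chars.join ['/'] (List.splitOn '/' s) = s := by
  rw [join_def]; exact List.intercalate_splitOn s '/'

-- join over an append of nonempty part lists
theorem join_append_of_ne_nil (xs ys : List (List Char)) (hx : xs ≠ []) (hy : ys ≠ []) :
    PySem.Chars.join ['/'] (xs ++ ys)
      = PySem.Chars.join ['/'] xs ++ '/' :: PySem.Chars.join ['/'] ys := by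
  induction xs with
  | nil => exact absurd rfl hx
  | cons x xs ih =>
    cases xs with
    | nil =>
      obtain ⟨y, ys', rfl⟩ := List.exists_cons_of_ne_nil hy
      rw [show ([x] ++ y :: ys') = x :: y :: ys' from rfl, PySem.Chars.join_cons_cons,
        PySem.Chars.join_singleton]
      simp
    | cons x' xs' =>
      rw [show ((x :: x' :: xs') ++ ys) = x :: x' :: (xs' ++ ys) from rfl,
        PySem.Chars.join_cons_cons,
        show (x' :: (xs' ++ ys)) = (x' :: xs') ++ ys from rfl,
        ih (by simp), PySem.Chars.join_cons_cons]
      simp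

-- a nonempty stack with nonempty bottom joins to a nonempty string
theorem join_ne_nil_of_good (st : List (List Char)) (hG : goodB st) (h : st ≠ []) :
    PySem.Chars.join ['/'] st ≠ [] := by
  obtain ⟨p, t, rfl⟩ := List.exists_cons_of_ne_nil h
  have hp : p ≠ [] := hG p rfl
  cases t with
  | nil => rw [PySem.Chars.join_singleton]; exact hp
  | cons q t' => rw [PySem.Chars.join_cons_cons]; simp [hp]

-- a stack joining to the empty string is [] or [""]
theorem join_eq_nil (st : List (List Char)) (h : PySem.Chars.join ['/'] st = []) :
    st = [] ∨ st = [[]] := by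
  cases st with
  | nil => exact Or.inl rfl
  | cons x xs =>
    cases xs with
    | nil => rw [PySem.Chars.join_singleton] at h; right; rw [h]
    | cons y t => rw [PySem.Chars.join_cons_cons] at h; simp at h

-- unfolding the Bool helpers of Pre_
theorem isSpecial_false (c : String) :
    isSpecial c = false ↔ c ≠ "cd /" ∧ c ≠ "cd ." ∧ c ≠ "cd .." := by
  simp [isSpecial, and_assoc]
theorem goodArg_true (c : String) :
    goodArg c = true ↔ argOf c.toList ≠ [] ∧ (argOf c.toList).head? ≠ some '/' := by
  simp [goodArg]

-- '/' followed by the join of a nonempty stack is the join with a '' component in front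
theorem cons_slash_join (p : List Char) (t : List (List Char)) :
    '/' :: PySem.Chars.join ['/'] (p :: t) = PySem.Chars.join ['/'] ([] :: p :: t) := by
  rw [PySem.Chars.join_cons_cons]; simp

-- a nonempty string not starting with '/' splits into pieces whose first is nonempty
theorem head_splitOn_ne_nil (d : List Char) (hd : d ≠ []) (hh : d.head? ≠ some '/') :
    ∀ h, (List.splitOn '/' d).head? = some h → h ≠ [] := by
  obtain ⟨a, d', rfl⟩ := List.exists_cons_of_ne_nil hd
  have ha : a ≠ '/' := by intro h; exact hh (by simp [h])
  intro h hh'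
  rw [splitOn_def, List.splitOnP_cons, ← splitOn_def] at hh'
  have : (a == '/') = false := by simp [ha]
  rw [this] at hh'
  simp only [Bool.false_eq_true, if_false] at hh'
  obtain ⟨h0, t0, hS⟩ := List.exists_cons_of_ne_nil (splitOn_ne_nil '/' d')
  rw [hS, List.modifyHead_cons] at hh'
  simp at hh'
  subst hh'
  simp

-- ===== STEP 1: A's string fold is '/' ++ join of the forward component stack =====
theorem stepA_main (st : List (List Char)) (c : String) (hsf : slashFree st)
    (hgb : c ≠ "cd /" → c ≠ "cd ." → c ≠ "cd .." → goodB st) :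
    solStepA ('/' :: PySem.Chars.join ['/'] st) c.toList
        = '/' :: PySem.Chars.join ['/'] (stackStep st c)
      ∧ slashFree (stackStep st c)
      ∧ ((goodB st ∧ (c ≠ "cd /" → c ≠ "cd ." → c ≠ "cd .." →
            argOf c.toList ≠ [] ∧ (argOf c.toList).head? ≠ some '/')) →
          goodB (stackStep st c)) := by
  have hlist : ∀ (t : String), c.toList = t.toList ↔ c = t := by
    intro t
    constructor
    · intro h; exact String.ext (by simpa [String.data] using h)
    · intro h; rw [h]
  by_cases h1 : c = "cd /"
  · refine ⟨?_, by simp [slashFree, stackStep, h1], by simp [goodB, stackStep, h1]⟩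
    simp [solStepA, stackStep, (hlist "cd /").mpr h1, h1, PySem.Chars.join_nil]
  by_cases h2 : c = "cd ."
  · refine ⟨?_, by simpa [stackStep, h1, h2] using hsf,
      fun hg => by simpa [stackStep, h1, h2] using hg.1⟩
    have hc2 : c.toList = "cd .".toList := (hlist "cd .").mpr h2
    have hA1 : c.toList ≠ "cd /".toList := fun h => h1 ((hlist "cd /").mp h)
    simp [solStepA, stackStep, hc2, hA1, h1, h2]
  by_cases h3 : c = "cd .."
  · -- pop
    have hc3 : c.toList = "cd ..".toList := (hlist "cd ..").mpr h3
    have hA1 : c.toList ≠ "cd /".toList := fun h => h1 ((hlist "cd /").mp h)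
    have hA2 : c.toList ≠ "cd .".toList := fun h => h2 ((hlist "cd .").mp h)
    have hsf' : slashFree (stackStep st c) := by
      rw [show stackStep st c = st.dropLast by simp [stackStep, h1, h2, h3]]
      exact fun q hq => hsf q (List.dropLast_subset _ hq)
    have hgb' : (goodB st ∧ (c ≠ "cd /" → c ≠ "cd ." → c ≠ "cd .." →
          argOf c.toList ≠ [] ∧ (argOf c.toList).head? ≠ some '/')) →
        goodB (stackStep st c) := by
      rintro ⟨hg, -⟩
      simp only [stackStep, if_neg h1, if_neg h2, if_pos h3]
      intro h hh
      apply hg h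
      cases st with
      | nil => simp at hh
      | cons p t =>
        cases t with
        | nil => simp at hh
        | cons q t' => simpa using hh
    refine ⟨?_, hsf', hgb'⟩
    by_cases hroot : PySem.Chars.join ['/'] st = []
    · rcases join_eq_nil st hroot with rfl | rfl
      · simp [solStepA, stackStep, hA1, hA2, hc3, h1, h2, h3, PySem.Chars.join_nil]
      · simp [solStepA, stackStep, hA1, hA2, hc3, h1, h2, h3,
          PySem.Chars.join_singleton, PySem.Chars.join_nil]
    · obtain ⟨p, t, rfl⟩ : ∃ p t, st = p :: t := by
        rcases st with _ | ⟨p, t⟩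
        · exact absurd (PySem.Chars.join_nil ['/']) hroot
        · exact ⟨p, t, rfl⟩
      have hcur : ('/' :: PySem.Chars.join ['/'] (p :: t)) ≠ "/".toList := by
        intro h
        have : PySem.Chars.join ['/'] (p :: t) = [] := by
          simpa using congrArg List.tail h
        exact hroot this
      have hsplit : PySem.Chars.splitOn ('/' :: PySem.Chars.join ['/'] (p :: t)) ['/']
          = [] :: p :: t := by
        rw [cons_slash_join, splitOn_single, join_def]
        exact List.splitOn_intercalate ([] :: p :: t) '/'
          (by intro l hl
              rcases List.mem_cons.mp hl with h | h
              · subst h; simp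
              · exact hsf l h)
          (by simp)
      rw [show solStepA ('/' :: PySem.Chars.join ['/'] (p :: t)) c.toList
            = (if PySem.Chars.join ['/']
                  (PySem.List.slice
                    (PySem.Chars.splitOn ('/' :: PySem.Chars.join ['/'] (p :: t)) ['/'])
                    none (some (-1))) = []
               then "/".toList
               else PySem.Chars.join ['/']
                  (PySem.List.slice
                    (PySem.Chars.splitOn ('/' :: PySem.Chars.join ['/'] (p :: t)) ['/'])
                    none (some (-1)))) by
          simp [solStepA, hA1, hA2, hc3, hcur]
          intro hj
          exact absurd hj hroot]
      rw [hsplit, PySem.List.slice_to_neg_one,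
        show ([] :: p :: t).dropLast = [] :: (p :: t).dropLast by
          rcases t with _ | ⟨q, t'⟩ <;> simp,
        show stackStep (p :: t) c = (p :: t).dropLast by
          simp [stackStep, h1, h2, h3]]
      cases hdl : (p :: t).dropLast with
      | nil => simp [PySem.Chars.join_singleton, PySem.Chars.join_nil]
      | cons q t' =>
        rw [PySem.Chars.join_cons_cons]
        simp
  · -- push
    have hgood : goodB st := hgb h1 h2 h3
    have hA1 : c.toList ≠ "cd /".toList := fun h => h1 ((hlist "cd /").mp h)
    have hA2 : c.toList ≠ "cd .".toList := fun h => h2 ((hlist "cd .").mp h)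
    have hA3 : c.toList ≠ "cd ..".toList := fun h => h3 ((hlist "cd ..").mp h)
    have hparts : PySem.Chars.splitOn (argOf c.toList) ['/'] = List.splitOn '/' (argOf c.toList) :=
      splitOn_single '/' _
    have hSstep : stackStep st c = st ++ List.splitOn '/' (argOf c.toList) := by
      simp [stackStep, h1, h2, h3, hparts]
    have hsf' : slashFree (stackStep st c) := by
      rw [hSstep]
      intro q hq
      rcases List.mem_append.mp hq with h | h
      · exact hsf q h
      · exact not_mem_of_mem_splitOn '/' _ q h
    have hgb' : (goodB st ∧ (c ≠ "cd /" → c ≠ "cd ." → c ≠ "cd .." →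
          argOf c.toList ≠ [] ∧ (argOf c.toList).head? ≠ some '/')) →
        goodB (stackStep st c) := by
      rintro ⟨hg, harg⟩
      obtain ⟨hd, hh⟩ := harg h1 h2 h3
      rw [hSstep]
      intro h hh'
      cases st with
      | nil => exact head_splitOn_ne_nil _ hd hh h (by simpa using hh')
      | cons p t => exact hg h (by simpa using hh')
    refine ⟨?_, hsf', hgb'⟩
    cases st with
    | nil =>
      have hr : ('/' :: PySem.Chars.join ['/'] ([] : List (List Char))) = "/".toList := by
        simp [PySem.Chars.join_nil]
      rw [hSstep]
      simp only [solStepA, hA1, hA2, hA3, if_neg, if_pos, hr]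
      simp only [List.nil_append]
      rw [join_splitOn]
      rfl
    | cons p t =>
      have hstne : p :: t ≠ ([] : List (List Char)) := by simp
      have hroot : PySem.Chars.join ['/'] (p :: t) ≠ [] :=
        join_ne_nil_of_good _ hgood hstne
      have hcur : ('/' :: PySem.Chars.join ['/'] (p :: t)) ≠ "/".toList := by
        intro h
        have : PySem.Chars.join ['/'] (p :: t) = [] := by
          simpa using congrArg List.tail h
        exact hroot this
      have hB1 : c.toList ≠ ['c', 'd', ' ', '/'] := hA1
      have hB2 : c.toList ≠ ['c', 'd', ' ', '.'] := hA2
      have hB3 : c.toList ≠ ['c', 'd', ' ', '.', '.'] := hA3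
      rw [hSstep,
        join_append_of_ne_nil _ _ hstne (splitOn_ne_nil '/' _), join_splitOn]
      simp [solStepA, hB1, hB2, hB3, hroot, hcur, argOf]

-- after the last push only special commands remain: slash-freeness alone suffices
theorem foldA_special (commands : List String) : ∀ (st : List (List Char)), slashFree st →
    (∀ c ∈ commands, c = "cd /" ∨ c = "cd ." ∨ c = "cd ..") →
    commands.foldl (fun cur c => solStepA cur c.toList) ('/' :: PySem.Chars.join ['/'] st)
      = '/' :: PySem.Chars.join ['/'] (commands.foldl stackStep st) := by
  induction commands with
  | nil => intro st _ _; rfl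
  | cons c cs ih =>
    intro st hsf hP
    have hspec := hP c (by simp)
    have hgb : c ≠ "cd /" → c ≠ "cd ." → c ≠ "cd .." → goodB st := by
      intro hx hy hz
      rcases hspec with h | h | h
      · exact absurd h hx
      · exact absurd h hy
      · exact absurd h hz
    obtain ⟨hstep, hsf', -⟩ := stepA_main st c hsf hgb
    rw [List.foldl_cons, List.foldl_cons, hstep]
    exact ih _ hsf' (fun c' hc' => hP c' (List.mem_cons_of_mem _ hc'))

theorem foldA_main (commands : List String) : ∀ (st : List (List Char)),
    slashFree st → goodB st →
    List.Pairwise (fun a b => isSpecial a = false → isSpecial b = false → goodArg a = true)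
      commands →
    commands.foldl (fun cur c => solStepA cur c.toList) ('/' :: PySem.Chars.join ['/'] st)
      = '/' :: PySem.Chars.join ['/'] (commands.foldl stackStep st) := by
  induction commands with
  | nil => intro st _ _ _; rfl
  | cons c cs ih =>
    intro st hsf hgb hPair
    rw [List.pairwise_cons] at hPair
    obtain ⟨hhead, htail⟩ := hPair
    obtain ⟨hstep, hsf', hgb'⟩ := stepA_main st c hsf (fun _ _ _ => hgb)
    rw [List.foldl_cons, List.foldl_cons, hstep]
    by_cases hok : c ≠ "cd /" → c ≠ "cd ." → c ≠ "cd .." →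
        argOf c.toList ≠ [] ∧ (argOf c.toList).head? ≠ some '/'
    · exact ih _ hsf' (hgb' ⟨hgb, hok⟩) htail
    · -- a bad-argument push: by Pre_ every later command is special
      push_neg at hok
      obtain ⟨hx, hy, hz, hbad⟩ := hok
      have hcspec : isSpecial c = false := (isSpecial_false c).mpr ⟨hx, hy, hz⟩
      have hbad' : ¬ goodArg c = true := by
        rw [goodArg_true]
        rintro ⟨ha, hb⟩
        exact hb (hbad ha)
      apply foldA_special cs _ hsf'
      intro c' hc'
      by_contra hns
      have : c' ≠ "cd /" ∧ c' ≠ "cd ." ∧ c' ≠ "cd .." := by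
        push_neg at hns
        exact hns
      exact hbad' (hhead c' hc' hcspec ((isSpecial_false c').mpr this))

-- ===== STEP 2: the reverse scan with a deferred-pop counter equals the forward stack fold =====
def dropLastN (n : Nat) (l : List (List Char)) : List (List Char) := l.take (l.length - n)

theorem dropLastN_succ (n : Nat) (l : List (List Char)) :
    dropLastN (n + 1) l = dropLastN n l.dropLast := by
  unfold dropLastN
  rw [List.dropLast_eq_take, List.take_take, List.length_take]
  congr 1
  omega

theorem dropLastN_zero (l : List (List Char)) : dropLastN 0 l = l := by
  simp [dropLastN]

theorem popLoop_eq : ∀ (skip : Nat) (parts : List (List Char)),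
    popLoop parts skip = (dropLastN skip parts, skip - parts.length) := by
  intro skip
  induction skip with
  | zero => intro parts; simp [popLoop, dropLastN_zero]
  | succ s ih =>
    intro parts
    cases parts with
    | nil => simp [popLoop, dropLastN]
    | cons p ps =>
      rw [show popLoop (p :: ps) (s + 1) = popLoop (p :: ps).dropLast s from rfl,
        ih, dropLastN_succ]
      have : (p :: ps).dropLast.length = ps.length := by simp
      rw [this]
      have : s - ps.length = s + 1 - (p :: ps).length := by simp
      rw [this]

theorem dropLastN_append (n : Nat) (S P : List (List Char)) :
    dropLastN n (S ++ P) = dropLastN (n - P.length) S ++ dropLastN n P := by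
  unfold dropLastN
  rw [List.length_append, List.take_append]
  by_cases h : n ≤ P.length
  · have e1 : n - P.length = 0 := by omega
    have e2 : S.length + P.length - n - S.length = P.length - n := by omega
    rw [e1, e2]
    congr 1
    rw [List.take_of_length_le (by omega), Nat.sub_zero, List.take_length]
  · have e1 : S.length + P.length - n = S.length - (n - P.length) := by omega
    have e2 : S.length + P.length - n - S.length = 0 := by omega
    have e3 : P.length - n = 0 := by omega
    rw [e2, e3, e1]

theorem revLoop_eq (rs : List String) : ∀ (comps : List (List Char)) (skip : Nat),
    solRevLoop rs comps skip
      = dropLastN skip (rs.reverse.foldl stackStep []) ++ comps := by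
  induction rs with
  | nil => intro comps skip; simp [solRevLoop, dropLastN]
  | cons c rest ih =>
    intro comps skip
    have hrev : (c :: rest).reverse.foldl stackStep ([] : List (List Char))
        = stackStep (rest.reverse.foldl stackStep []) c := by
      rw [List.reverse_cons, List.foldl_append]
      rfl
    rw [hrev]
    by_cases h1 : c = "cd /"
    · simp [solRevLoop, h1, stackStep, dropLastN]
    by_cases h2 : c = "cd ."
    · rw [show solRevLoop (c :: rest) comps skip = solRevLoop rest comps skip by
          simp [solRevLoop, h1, h2],
        ih, show stackStep (rest.reverse.foldl stackStep []) c
          = rest.reverse.foldl stackStep [] by simp [stackStep, h1, h2]]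
    by_cases h3 : c = "cd .."
    · rw [show solRevLoop (c :: rest) comps skip = solRevLoop rest comps (skip + 1) by
          simp [solRevLoop, h1, h2, h3],
        ih, show stackStep (rest.reverse.foldl stackStep []) c
          = (rest.reverse.foldl stackStep []).dropLast by simp [stackStep, h1, h2, h3],
        ← dropLastN_succ]
    · rw [show solRevLoop (c :: rest) comps skip
          = solRevLoop rest
              ((popLoop (PySem.Chars.splitOn (argOf c.toList) ['/']) skip).1 ++ comps)
              (popLoop (PySem.Chars.splitOn (argOf c.toList) ['/']) skip).2 by
          simp [solRevLoop, h1, h2, h3, argOf],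
        ih, popLoop_eq,
        show stackStep (rest.reverse.foldl stackStep []) c
          = rest.reverse.foldl stackStep [] ++ PySem.Chars.splitOn (argOf c.toList) ['/'] by
          simp [stackStep, h1, h2, h3],
        dropLastN_append]
      simp

-- ===== VERDICT (by name: the statement is the Claim_ definition above) =====
theorem solution_spec : Claim_equal_solution := by
  intro commands _hD hP
  unfold Spec_solution solution solution_alt
  have h1 := foldA_main commands [] (by intro p hp; simp at hp) (by intro h hh; simp at hh) hP.2
  have h2 := revLoop_eq commands.reverse [] 0
  rw [List.reverse_reverse, dropLastN_zero, List.append_nil] at h2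
  rw [PySem.Chars.join_nil] at h1
  have hsep : ("/".toList : List Char) = ['/'] := by simp
  rw [hsep, h2, h1]
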